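-- pv_equiv track=rewrite | github.com/craigwatkins/nn_compression | huffman_compression.py | decompress_canonical_dict
-- ===== SOURCE A (Python) =====
-- def decompress_canonical_dict(compress_lengths, sorted_symbols):
--     """
--     Parameters
--     ----------
--     compress_lengths : List of integers
--         The number of bits for each sublist of sorted symbols, zero values
--         are used if there are no symbols of a specific length
--     sorted_symbols : Two dimensional list of binary strings
--         Each sublist grouped by bit size, then sorted in lexigraphical order
--
--     Returns
--     -------
--     canonical_codes : Dictionary
--          canonical code: symbol, reverse of compression dict
--     """
--     canonical_codes = {}
--     prev_code = 0
--     bit_diff = 0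
--     symbol_index = 0
--     first_code = False
--     for i, num_symbols in enumerate(compress_lengths):
--         # i: number of bits in symbol
--         format_string = "{0:0" + str(i) + "b}"
--         if num_symbols > 0:
--             if i > 0 and first_code is True:
--                 prev_code = prev_code + 1 << bit_diff
--             else:
--                 prev_code = prev_code << bit_diff
--                 first_code = True
--             for j in range(num_symbols):
--                 canonical_code = format_string.format(prev_code + j)
--                 # canonical_code = prev_code + j
--                 canonical_codes[canonical_code] = sorted_symbols[symbol_index]
--                 symbol_index += 1
--             prev_code = prev_code + j
--             bit_diff = 0
--         bit_diff += 1
--     return canonical_codes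
-- ===== SOURCE B (Python) =====
-- def decompress_canonical_dict(compress_lengths, sorted_symbols):
--     """Closed-form canonical codes: the first code of bit-length L is
--     sum(count[l] * 2**(L-l) for l < L), so no running code/shift/flag state
--     is kept at all; each entry is computed directly from the length table."""
--     counts = [max(c, 0) for c in compress_lengths]
--
--     def start(L):
--         # first canonical code of length L, as a direct weighted sum
--         return sum(counts[l] << (L - l) for l in range(L))
--
--     def offset(L):
--         # index of the first symbol of length L
--         return sum(counts[:L])
--
--     return {
--         format(start(L) + j, "0" + str(L) + "b"): sorted_symbols[offset(L) + j]
--         for L, n in enumerate(counts)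
--         for j in range(n)
--     }
-- ===== Notes on version B (the rewrite author's own statement) =====
-- stated objective: alternative
-- what changed: Replaces A's stateful single pass (prev_code/bit_diff/first_code lazy-shift bookkeeping) with a stateless closed form: the first code of bit-length L is computed directly as sum(count[l]*2**(L-l) for l<L) and the symbol offset as sum(counts[:L]), and the dict is built by a comprehension with no running code state.
import Mathlib
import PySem

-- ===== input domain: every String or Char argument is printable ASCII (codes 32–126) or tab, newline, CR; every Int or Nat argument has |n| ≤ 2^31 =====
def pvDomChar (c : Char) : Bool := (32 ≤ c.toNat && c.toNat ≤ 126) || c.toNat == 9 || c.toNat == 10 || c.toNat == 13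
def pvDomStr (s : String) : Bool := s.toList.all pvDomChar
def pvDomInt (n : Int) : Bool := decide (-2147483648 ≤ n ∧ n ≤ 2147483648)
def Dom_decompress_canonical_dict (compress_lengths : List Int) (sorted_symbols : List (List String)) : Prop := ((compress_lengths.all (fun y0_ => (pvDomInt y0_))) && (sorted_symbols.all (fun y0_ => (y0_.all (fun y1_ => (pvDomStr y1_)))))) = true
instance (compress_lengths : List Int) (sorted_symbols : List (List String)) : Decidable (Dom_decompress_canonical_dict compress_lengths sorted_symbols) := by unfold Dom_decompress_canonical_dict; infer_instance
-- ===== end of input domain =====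

-- B replaces A's prev_code/bit_diff/first_code running-state pass by a stateless closed form:
-- the first code of bit-length L is Σ_{l<L} count[l]·2^(L−l) and the symbol offset Σ_{l<L} count[l];
-- the dict is a comprehension over (length, count) pairs (alternative decomposition, same output).


-- format(n, "0" + str(width) + "b"): binary digits of n left-padded with '0' to `width`.
-- Exact for 0 ≤ n, the only values either program formats (codes are always nonnegative).
def pvFmtBin (width : Nat) (n : Int) : String :=
  let s := PySem.Int.toBinChars n
  String.ofList (List.replicate (width - s.length) '0' ++ s)

-- ===== PORT A =====
-- inner loop: for j in range(num_symbols): canonical_codes[fmt(prev_code+j)] = sorted_symbols[symbol_index]; symbol_index += 1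
-- (pyGetD is total; Pre_ guarantees symbol_index is in range exactly where Python does not raise IndexError)
def pvAInner (syms : List (List String)) (i : Nat) (prev : Int) :
    Nat → Int → PySem.Dict String (List String) → Int → PySem.Dict String (List String) × Int
  | 0, _, d, si => (d, si)
  | Nat.succ n, j, d, si =>
      pvAInner syms i prev n (j + 1)
        (d.insert (pvFmtBin i (prev + j)) (PySem.List.pyGetD syms si [])) (si + 1)

-- outer loop over enumerate(compress_lengths); bit_diff is kept as a Nat (it is 0, set to 1, or
-- incremented, never negative) and Python's `x << bit_diff` is written `x * 2 ^ bit_diff`.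
def pvALoop (syms : List (List String)) :
    List Int → Nat → PySem.Dict String (List String) → Int → Nat → Int → Bool → PySem.Dict String (List String)
  | [], _, d, _, _, _, _ => d
  | c :: rest, i, d, prev, bdiff, si, first =>
      if c > 0 then
        -- if i > 0 and first_code is True: prev = (prev+1) << bdiff else: prev = prev << bdiff; first = True
        let prev' := if 0 < i ∧ first = true then (prev + 1) * 2 ^ bdiff else prev * 2 ^ bdiff
        let first' := if 0 < i ∧ first = true then first else true
        let st := pvAInner syms i prev' c.toNat 0 d si
        -- prev_code = prev_code + j (final j = num_symbols - 1); bit_diff = 0; bit_diff += 1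
        pvALoop syms rest (i + 1) st.1 (prev' + (c - 1)) 1 st.2 first'
      else
        pvALoop syms rest (i + 1) d prev (bdiff + 1) si first

def decompress_canonical_dict (compress_lengths : List Int) (sorted_symbols : List (List String)) : List (String × List String) :=
  (pvALoop sorted_symbols compress_lengths 0 PySem.Dict.empty 0 0 0 false).items

-- ===== PORT B =====
-- start(L) = sum(counts[l] << (L - l) for l in range(L)); the shift is a multiplication by a
-- power of two (exact: the exponent L - l is positive on range(L)); counts[l] is always in range.
def pvBStart (counts : List Int) (L : Int) : Int :=
  ((PySem.List.pyRange 0 L 1).map (fun l => PySem.List.pyGetD counts l 0 * 2 ^ (L - l).toNat)).sum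

-- offset(L) = sum(counts[:L])
def pvBOffset (counts : List Int) (L : Int) : Int :=
  (PySem.List.slice counts none (some L)).sum

-- counts = [max(c, 0) for c in compress_lengths]; then the dict comprehension
-- { fmt(start(L)+j) : sorted_symbols[offset(L)+j]  for L, n in enumerate(counts) for j in range(n) }
-- (L from enumerate(…, 0) is nonnegative, so the format width str(L) is L.toNat exactly)
def decompress_canonical_dict_alt (compress_lengths : List Int) (sorted_symbols : List (List String)) : List (String × List String) :=
  let counts := compress_lengths.map (fun c => max c 0)
  (((PySem.List.enumerate counts 0).flatMap (fun p =>
      (PySem.List.pyRange 0 p.2 1).map (fun j =>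
        (pvFmtBin p.1.toNat (pvBStart counts p.1 + j),
         PySem.List.pyGetD sorted_symbols (pvBOffset counts p.1 + j) [])))).foldl
    (fun d kv => d.insert kv.1 kv.2) PySem.Dict.empty).items

-- ===== PRECONDITION & SPEC =====
-- Pre_ excludes exactly the inputs where A raises IndexError: fewer symbol sublists than
-- the total of the positive counts in compress_lengths.
def Pre_decompress_canonical_dict (compress_lengths : List Int) (sorted_symbols : List (List String)) : Prop :=
  (compress_lengths.map Int.toNat).sum ≤ sorted_symbols.length
instance (compress_lengths : List Int) (sorted_symbols : List (List String)) : Decidable (Pre_decompress_canonical_dict compress_lengths sorted_symbols) := by unfold Pre_decompress_canonical_dict; infer_instance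

def pvWitness_decompress_canonical_dict : List Int × List (List String) := ([0, 2, 1], [["a"], ["bb"], ["c"]])

def Spec_decompress_canonical_dict (compress_lengths : List Int) (sorted_symbols : List (List String)) (out : List (String × List String)) : Prop := out = decompress_canonical_dict_alt compress_lengths sorted_symbols
instance (compress_lengths : List Int) (sorted_symbols : List (List String)) (out : List (String × List String)) : Decidable (Spec_decompress_canonical_dict compress_lengths sorted_symbols out) := by unfold Spec_decompress_canonical_dict; infer_instance

-- ===== CLAIM (what is proved, stated in full; the proofs are below) =====
def Claim_equal_decompress_canonical_dict : Prop := ∀ (compress_lengths : List Int) (sorted_symbols : List (List String)), Dom_decompress_canonical_dict compress_lengths sorted_symbols → Pre_decompress_canonical_dict compress_lengths sorted_symbols → Spec_decompress_canonical_dict compress_lengths sorted_symbols (decompress_canonical_dict compress_lengths sorted_symbols)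

-- ===== LEMMAS AND PROOFS =====

-- step law for B's closed-form start: S(n+1) = (S(n) + counts[n]) * 2
lemma pvBStart_succ (counts : List Int) (n : Nat) :
    pvBStart counts ((n : Int) + 1) = (pvBStart counts n + PySem.List.pyGetD counts (n : Int) 0) * 2 := by
  unfold pvBStart
  rw [PySem.List.pyRange_one_succ_right (by positivity)]
  rw [List.map_append, List.sum_append]
  have h1 : ((PySem.List.pyRange 0 (n : Int) 1).map
      (fun l => PySem.List.pyGetD counts l 0 * 2 ^ (((n : Int) + 1) - l).toNat)).sum
      = ((PySem.List.pyRange 0 (n : Int) 1).map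
      (fun l => (PySem.List.pyGetD counts l 0 * 2 ^ ((n : Int) - l).toNat) * 2)).sum := by
    congr 1
    apply List.map_congr_left
    intro l hl
    rw [PySem.List.mem_pyRange_one] at hl
    have h2 : (((n : Int) + 1) - l).toNat = ((n : Int) - l).toNat + 1 := by omega
    rw [h2, pow_succ]; ring
  rw [h1, List.sum_map_mul_right]
  have h3 : (((n : Int) + 1) - (n : Int)).toNat = 1 := by omega
  simp only [List.map_cons, List.map_nil, List.sum_cons, List.sum_nil, h3, pow_one]
  ring

-- step law for B's symbol offset: O(n+1) = O(n) + counts[n]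
lemma pvBOffset_succ (counts : List Int) (n : Nat) :
    pvBOffset counts ((n : Int) + 1) = pvBOffset counts n + PySem.List.pyGetD counts (n : Int) 0 := by
  unfold pvBOffset
  rw [show ((n : Int) + 1) = ((n + 1 : Nat) : Int) by push_cast; ring]
  rw [PySem.List.slice_to_natCast, PySem.List.slice_to_natCast]
  rw [List.take_add_one, List.sum_append]
  have hd : PySem.List.pyGetD counts (n : Int) 0 = (counts[n]?).getD 0 := by
    rw [PySem.List.pyGetD_natCast, List.getD_eq_getElem?_getD]
  rw [hd]
  cases counts[n]? <;> simp

-- A's inner loop inserts exactly B's pairs for one (length, count) group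
lemma pvAInner_pairs (syms : List (List String)) (i : Nat) (prev : Int) :
    ∀ (n : Nat) (j si : Int) (d : PySem.Dict String (List String)),
    pvAInner syms i prev n j d si
      = (((List.range n).map (fun (k : Nat) =>
            (pvFmtBin i (prev + j + (k : Int)), PySem.List.pyGetD syms (si + (k : Int)) []))).foldl
          (fun d kv => d.insert kv.1 kv.2) d,
         si + n) := by
  intro n
  induction n with
  | zero =>
    intro j si d
    simp only [pvAInner, List.range_zero, List.map_nil, List.foldl_nil, Nat.cast_zero, add_zero]
  | succ m ih =>
    intro j si d
    simp only [pvAInner]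
    rw [ih (j + 1) (si + 1)]
    rw [List.range_succ_eq_map]
    simp only [List.map_cons, List.foldl_cons, List.map_map, Nat.cast_zero, add_zero]
    refine Prod.ext ?_ ?_
    · dsimp only
      have hL : (List.range m).map (fun (k : Nat) =>
            (pvFmtBin i (prev + (j + 1) + (k : Int)), PySem.List.pyGetD syms (si + 1 + (k : Int)) []))
          = (List.range m).map ((fun (k : Nat) =>
            (pvFmtBin i (prev + j + (k : Int)), PySem.List.pyGetD syms (si + (k : Int)) [])) ∘ Nat.succ) := by
        apply List.map_congr_left
        intro k _
        simp only [Function.comp, Nat.succ_eq_add_one]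
        have e1 : prev + (j + 1) + (k : Int) = prev + j + ((k + 1 : Nat) : Int) := by push_cast; ring
        have e2 : si + 1 + (k : Int) = si + ((k + 1 : Nat) : Int) := by push_cast; ring
        rw [e1, e2]
      rw [hL]
    · dsimp only; push_cast; ring

-- A's outer loop, under its state invariants, builds B's dict over the remaining suffix
lemma pvALoop_pairs (syms : List (List String)) (counts : List Int) :
    ∀ (rest : List Int) (n : Nat) (d : PySem.Dict String (List String))
      (prev : Int) (bdiff : Nat) (si : Int) (first : Bool),
    counts.drop n = rest.map (fun c => max c 0) →
    si = pvBOffset counts n →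
    (first = false → prev = 0 ∧ pvBStart counts n = 0) →
    (first = true → 0 < n ∧ (prev + 1) * 2 ^ bdiff = pvBStart counts n) →
    pvALoop syms rest n d prev bdiff si first
      = ((PySem.List.enumerate (rest.map (fun c => max c 0)) (n : Int)).flatMap (fun p =>
          (PySem.List.pyRange 0 p.2 1).map (fun j =>
            (pvFmtBin p.1.toNat (pvBStart counts p.1 + j),
             PySem.List.pyGetD syms (pvBOffset counts p.1 + j) [])))).foldl
          (fun d kv => d.insert kv.1 kv.2) d := by
  intro rest
  induction rest with
  | nil =>
    intro n d prev bdiff si first _ _ _ _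
    simp [pvALoop, PySem.List.enumerate_nil]
  | cons c r ih =>
    intro n d prev bdiff si first hdrop hsi hf ht
    have hlt : n < counts.length := by
      by_contra h
      rw [List.drop_eq_nil_of_le (by omega)] at hdrop
      simp at hdrop
    have hcons := List.drop_eq_getElem_cons hlt
    have h2 : counts[n] :: counts.drop (n + 1) = max c 0 :: r.map (fun c => max c 0) := by
      rw [← hcons, hdrop, List.map_cons]
    have hget : counts[n] = max c 0 := (List.cons_eq_cons.mp h2).1
    have hdrop' : counts.drop (n + 1) = r.map (fun c => max c 0) := (List.cons_eq_cons.mp h2).2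
    have hgetD : PySem.List.pyGetD counts (n : Int) 0 = max c 0 := by
      rw [PySem.List.pyGetD_natCast, List.getD_eq_getElem?_getD]
      simp [List.getElem?_eq_getElem hlt, hget]
    have hcast : ((n : Int) + 1) = ((n + 1 : Nat) : Int) := by push_cast; ring
    simp only [List.map_cons, PySem.List.enumerate_cons, List.flatMap_cons, List.foldl_append]
    simp only [pvALoop]
    by_cases hc : c > 0
    · rw [if_pos hc]
      have hmax : max c 0 = c := by omega
      -- the value A shifts to is exactly B's closed-form start S(n)
      have hprev' : (if 0 < n ∧ first = true then (prev + 1) * 2 ^ bdiff else prev * 2 ^ bdiff)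
          = pvBStart counts n := by
        by_cases hcond : 0 < n ∧ first = true
        · rw [if_pos hcond]; exact (ht hcond.2).2
        · rw [if_neg hcond]
          cases hfirst : first with
          | true => exact absurd ⟨(ht hfirst).1, hfirst⟩ hcond
          | false =>
            obtain ⟨hp, hs⟩ := hf hfirst
            rw [hp, hs]; ring
      have hfirst' : (if 0 < n ∧ first = true then first else true) = true := by
        by_cases hcond : 0 < n ∧ first = true
        · rw [if_pos hcond]; exact hcond.2
        · rw [if_neg hcond]
      rw [hprev', hfirst']
      rw [pvAInner_pairs]
      dsimp only
      -- B's group for (n, c) is the list A's inner loop inserted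
      have hgroup : (PySem.List.pyRange 0 (max c 0) 1).map (fun j =>
            (pvFmtBin ((n : Int)).toNat (pvBStart counts (n : Int) + j),
             PySem.List.pyGetD syms (pvBOffset counts (n : Int) + j) []))
          = (List.range c.toNat).map (fun (k : Nat) =>
            (pvFmtBin n (pvBStart counts n + 0 + (k : Int)), PySem.List.pyGetD syms (si + (k : Int)) [])) := by
        rw [hmax, PySem.List.pyRange_one]
        simp only [List.map_map, sub_zero]
        apply List.map_congr_left
        intro k _
        simp only [Function.comp, Int.toNat_natCast, zero_add, add_zero, hsi]
      rw [hgroup, hcast]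
      exact ih (n + 1) _ _ 1 _ true hdrop'
        (by rw [hsi, ← hcast, pvBOffset_succ, hgetD, hmax]
            push_cast [Int.toNat_of_nonneg (le_of_lt hc)]; ring)
        (fun h => nomatch h)
        (fun _ => ⟨by omega, by
          rw [← hcast, pvBStart_succ, hgetD, hmax]; ring⟩)
    · rw [if_neg hc]
      have hmax : max c 0 = 0 := by omega
      rw [hmax]
      have hnil : PySem.List.pyRange (0 : Int) 0 1 = [] := by decide
      rw [hnil, List.map_nil, List.foldl_nil, hcast]
      exact ih (n + 1) d prev (bdiff + 1) si first hdrop'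
        (by rw [hsi, ← hcast, pvBOffset_succ, hgetD, hmax]; ring)
        (fun hfirst => by
          obtain ⟨hp, hs⟩ := hf hfirst
          exact ⟨hp, by rw [← hcast, pvBStart_succ, hgetD, hmax, hs]; ring⟩)
        (fun hfirst => by
          obtain ⟨hn, hs⟩ := ht hfirst
          exact ⟨by omega, by rw [← hcast, pvBStart_succ, hgetD, hmax, ← hs, pow_succ]; ring⟩)

-- ===== VERDICT (by name: the statement is the Claim_ definition above) =====
theorem decompress_canonical_dict_spec : Claim_equal_decompress_canonical_dict := by
  intro cls syms _ _
  unfold Spec_decompress_canonical_dict decompress_canonical_dict decompress_canonical_dict_alt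
  have h := pvALoop_pairs syms (cls.map (fun c => max c 0)) cls 0
    PySem.Dict.empty 0 0 0 false (by simp) (by simp [pvBOffset, PySem.List.slice])
    (fun _ => ⟨rfl, by simp [pvBStart, PySem.List.pyRange_one_eq_nil]⟩) (fun h => nomatch h)
  exact congrArg PySem.Dict.items (by simpa using h)
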